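-- pv_equiv track=rewrite | github.com/andlamb2002/lambro-trainer-v2 | src/scripts/utils.py | choose_unique_solutions
-- ===== SOURCE A (Python) =====
-- def choose_unique_solutions(solutions: list[str], max_solutions: int = 4) -> list[str]:
--     chosen: list[str] = []
--     used_first: set[str] = set()
--     for sol in solutions:
--         moves = sol.split()
--         if not moves:
--             continue
--         first = moves[0]
--         if first not in used_first:
--             chosen.append(sol)
--             used_first.add(first)
--         if len(chosen) == max_solutions:
--             break
--     if len(chosen) < max_solutions:
--         for sol in solutions:
--             if sol not in chosen:
--                 chosen.append(sol)
--             if len(chosen) == max_solutions: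
--                 break
--     return chosen
-- ===== SOURCE B (Python) =====
-- def choose_unique_solutions(solutions: list[str], max_solutions: int = 4) -> list[str]:
--     chosen: list[str] = []
--     leftover: list[str] = []
--     used_first: set[str] = set()
--     for sol in solutions:
--         moves = sol.split()
--         if moves and moves[0] not in used_first:
--             used_first.add(moves[0])
--             chosen.append(sol)
--             if len(chosen) == max_solutions:
--                 return chosen
--         else:
--             leftover.append(sol)
--     if len(chosen) < max_solutions:
--         seen = set(chosen)
--         for sol in leftover:
--             if sol not in seen:
--                 seen.add(sol)
--                 chosen.append(sol)
--                 if len(chosen) == max_solutions: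
--                     break
--     return chosen
-- ===== Notes on version B (the rewrite author's own statement) =====
-- stated objective: alternative
-- what changed: Single pass that splits solutions into chosen and a leftover list, then fills from leftover using a set of already-chosen strings, instead of re-scanning the whole input list with a linear 'sol not in chosen' membership test.
import Mathlib
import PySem

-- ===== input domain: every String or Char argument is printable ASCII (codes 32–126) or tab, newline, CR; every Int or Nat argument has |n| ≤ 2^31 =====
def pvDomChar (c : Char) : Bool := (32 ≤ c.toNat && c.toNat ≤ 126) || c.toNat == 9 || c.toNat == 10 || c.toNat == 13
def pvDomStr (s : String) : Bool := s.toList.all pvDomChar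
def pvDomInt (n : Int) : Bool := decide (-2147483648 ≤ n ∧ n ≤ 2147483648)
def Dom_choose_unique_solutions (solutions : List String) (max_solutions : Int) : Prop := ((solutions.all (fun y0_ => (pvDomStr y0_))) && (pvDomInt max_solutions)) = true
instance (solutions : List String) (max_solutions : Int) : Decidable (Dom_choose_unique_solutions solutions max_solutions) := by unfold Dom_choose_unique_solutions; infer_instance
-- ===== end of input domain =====

-- B replaces A's second full re-scan of `solutions` (with its linear `sol not in chosen` test)
-- by a leftover list collected during the first pass plus a set-based merge (objective: alternative).

-- ===== PORT A =====
-- first loop of A: for sol in solutions: split; continue on empty; append if first unused; break at max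
def csA_loop1 (sols : List String) (chosen : List String) (used : PySem.Set String) (maxs : Int) : List String :=
  match sols with
  | [] => chosen
  | sol :: rest =>
    let moves := PySem.Str.split₀ sol
    match moves with
    | [] => csA_loop1 rest chosen used maxs
    | first :: _ =>
      let st := if PySem.Set.contains used first then (chosen, used)
                else (chosen ++ [sol], PySem.Set.add used first)
      if (st.1.length : Int) = maxs then st.1
      else csA_loop1 rest st.1 st.2 maxs

-- second loop of A: for sol in solutions: append if not in chosen; break at max
def csA_loop2 (sols : List String) (chosen : List String) (maxs : Int) : List String :=
  match sols with
  | [] => chosen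
  | sol :: rest =>
    let chosen' := if sol ∈ chosen then chosen else chosen ++ [sol]
    if (chosen'.length : Int) = maxs then chosen'
    else csA_loop2 rest chosen' maxs

def choose_unique_solutions (solutions : List String) (max_solutions : Int) : List String :=
  let chosen := csA_loop1 solutions [] PySem.Set.empty max_solutions
  if (chosen.length : Int) < max_solutions then csA_loop2 solutions chosen max_solutions
  else chosen

-- ===== PORT B =====
-- B's single pass: chosen as in A, skipped solutions go to leftover; early return at max (leftover unused then)
def csB_loop (sols : List String) (chosen leftover : List String) (used : PySem.Set String) (maxs : Int) : List String × List String :=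
  match sols with
  | [] => (chosen, leftover)
  | sol :: rest =>
    match PySem.Str.split₀ sol with
    | [] => csB_loop rest chosen (leftover ++ [sol]) used maxs
    | first :: _ =>
      if PySem.Set.contains used first then csB_loop rest chosen (leftover ++ [sol]) used maxs
      else
        let chosen' := chosen ++ [sol]
        if (chosen'.length : Int) = maxs then (chosen', leftover)
        else csB_loop rest chosen' leftover (PySem.Set.add used first) maxs

-- B's fill: walk leftover with a set `seen` of the strings already in chosen
def csB_fill (leftover : List String) (chosen : List String) (seen : PySem.Set String) (maxs : Int) : List String :=
  match leftover with
  | [] => chosen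
  | sol :: rest =>
    if PySem.Set.contains seen sol then csB_fill rest chosen seen maxs
    else
      let chosen' := chosen ++ [sol]
      if (chosen'.length : Int) = maxs then chosen'
      else csB_fill rest chosen' (PySem.Set.add seen sol) maxs

def choose_unique_solutions_alt (solutions : List String) (max_solutions : Int) : List String :=
  let r := csB_loop solutions [] [] PySem.Set.empty max_solutions
  if (r.1.length : Int) < max_solutions then csB_fill r.2 r.1 (PySem.Set.ofList r.1) max_solutions
  else r.1

-- ===== PRECONDITION & SPEC =====
def Spec_choose_unique_solutions (solutions : List String) (max_solutions : Int) (out : List String) : Prop := out = choose_unique_solutions_alt solutions max_solutions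
instance (solutions : List String) (max_solutions : Int) (out : List String) : Decidable (Spec_choose_unique_solutions solutions max_solutions out) := by unfold Spec_choose_unique_solutions; infer_instance

-- ===== CLAIM (what is proved, stated in full; the proofs are below) =====
def Claim_equal_choose_unique_solutions : Prop := ∀ (solutions : List String) (max_solutions : Int), Dom_choose_unique_solutions solutions max_solutions → Spec_choose_unique_solutions solutions max_solutions (choose_unique_solutions solutions max_solutions)

-- ===== LEMMAS AND PROOFS =====

-- `lo` is `xs` with some occurrences of elements of C deleted
inductive CsMerge (C : List String) : List String → List String → Prop
  | nil : CsMerge C [] []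
  | keep {s xs lo} : CsMerge C xs lo → CsMerge C (s :: xs) (s :: lo)
  | drop {s xs lo} : s ∈ C → CsMerge C xs lo → CsMerge C (s :: xs) lo

-- pass 1 only appends: the result extends the accumulator
theorem csA_loop1_prefix (sols : List String) (chosen : List String) (used : PySem.Set String) (maxs : Int) :
    ∃ t, csA_loop1 sols chosen used maxs = chosen ++ t := by
  induction sols generalizing chosen used with
  | nil => exact ⟨[], by simp [csA_loop1]⟩
  | cons sol rest ih =>
    cases h : PySem.Str.split₀ sol with
    | nil => simpa [csA_loop1, h] using ih chosen used
    | cons first tl =>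
      by_cases hc : PySem.Set.contains used first = true
      · simp only [csA_loop1, h, hc, if_true]
        split
        · exact ⟨[], by simp⟩
        · exact ih chosen used
      · have hc' : PySem.Set.contains used first = false := by simpa using hc
        simp only [csA_loop1, h, hc', Bool.false_eq_true, if_false]
        split
        · exact ⟨[sol], rfl⟩
        · obtain ⟨t, ht⟩ := ih (chosen ++ [sol]) (PySem.Set.add used first)
          exact ⟨[sol] ++ t, by simpa using ht⟩

-- B's pass agrees with A's pass 1 on chosen, and (when no break occurred) its leftover
-- is the input minus occurrences of finally-chosen strings
theorem csB_loop_spec (sols : List String) (chosen : List String) (used : PySem.Set String)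
    (lo : List String) (maxs : Int)
    (hinv : (chosen.length : Int) ≠ maxs ∨ (chosen = [] ∧ used = PySem.Set.empty)) :
    (csB_loop sols chosen lo used maxs).1 = csA_loop1 sols chosen used maxs ∧
    (((csA_loop1 sols chosen used maxs).length : Int) ≠ maxs →
      ∃ lo', (csB_loop sols chosen lo used maxs).2 = lo ++ lo' ∧
        CsMerge (csA_loop1 sols chosen used maxs) sols lo') := by
  induction sols generalizing chosen used lo with
  | nil => exact ⟨rfl, fun _ => ⟨[], by simp [csB_loop], CsMerge.nil⟩⟩
  | cons sol rest ih =>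
    cases h : PySem.Str.split₀ sol with
    | nil =>
      simp only [csA_loop1, csB_loop, h]
      obtain ⟨h1, h2⟩ := ih chosen used (lo ++ [sol]) hinv
      refine ⟨h1, fun hne => ?_⟩
      obtain ⟨lo', hlo, hm⟩ := h2 hne
      exact ⟨sol :: lo', by simpa using hlo, CsMerge.keep hm⟩
    | cons first tl =>
      by_cases hc : PySem.Set.contains used first = true
      · -- skipped: A's unconditional break check cannot fire under the invariant
        have hlen : (chosen.length : Int) ≠ maxs := by
          rcases hinv with h' | ⟨hc0, hu0⟩
          · exact h'
          · subst hu0; simp [PySem.Set.empty, PySem.Set.contains] at hc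
        simp only [csA_loop1, csB_loop, h, hc, if_true, if_neg hlen]
        obtain ⟨h1, h2⟩ := ih chosen used (lo ++ [sol]) (Or.inl hlen)
        refine ⟨h1, fun hne => ?_⟩
        obtain ⟨lo', hlo, hm⟩ := h2 hne
        exact ⟨sol :: lo', by simpa using hlo, CsMerge.keep hm⟩
      · have hc' : PySem.Set.contains used first = false := by simpa using hc
        by_cases hb : (((chosen ++ [sol]).length : Int)) = maxs
        · simp only [csA_loop1, csB_loop, h, hc', Bool.false_eq_true, if_false, hb, if_true]
          exact ⟨trivial, fun hne => absurd rfl hne⟩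
        · simp only [csA_loop1, csB_loop, h, hc', Bool.false_eq_true, if_false, hb]
          obtain ⟨h1, h2⟩ := ih (chosen ++ [sol]) (PySem.Set.add used first) lo (Or.inl hb)
          refine ⟨h1, fun hne => ?_⟩
          obtain ⟨lo', hlo, hm⟩ := h2 hne
          obtain ⟨t, ht⟩ := csA_loop1_prefix rest (chosen ++ [sol]) (PySem.Set.add used first) maxs
          have hsol : sol ∈ csA_loop1 rest (chosen ++ [sol]) (PySem.Set.add used first) maxs := by
            rw [ht]; simp
          exact ⟨lo', hlo, CsMerge.drop hsol hm⟩

-- A's pass 2 over the full list equals B's fill over the leftover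
theorem fill_eq (C : List String) (xs lo : List String) (hm : CsMerge C xs lo) :
    ∀ (chosen : List String) (seen : PySem.Set String) (maxs : Int),
    (∀ s, s ∈ C → s ∈ chosen) →
    (∀ s, PySem.Set.contains seen s = true ↔ s ∈ chosen) →
    (chosen.length : Int) < maxs →
    csA_loop2 xs chosen maxs = csB_fill lo chosen seen maxs := by
  induction hm with
  | nil => intro chosen seen maxs _ _ _; rfl
  | @keep s xs lo _ ih =>
    intro chosen seen maxs hC hseen hlt
    by_cases hs : s ∈ chosen
    · have hsc : PySem.Set.contains seen s = true := (hseen s).mpr hs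
      simp only [csA_loop2, csB_fill, hs, if_true, hsc]
      rw [if_neg (by omega : ¬ (chosen.length : Int) = maxs)]
      exact ih chosen seen maxs hC hseen hlt
    · have hsc : ¬ PySem.Set.contains seen s = true := fun h => hs ((hseen s).mp h)
      simp only [csA_loop2, csB_fill, hs, if_false, hsc]
      by_cases hb : (((chosen ++ [s]).length : Int)) = maxs
      · have hb' : (chosen.length : Int) + 1 = maxs := by simpa using hb
        simp [hb']
      · have hb' : ¬ ((chosen.length : Int) + 1 = maxs) := by simpa using hb
        simp only [hb, if_false]
        refine ih (chosen ++ [s]) (PySem.Set.add seen s) maxs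
          (fun x hx => by simp [hC x hx]) (fun x => ?_) (by simp; omega)
        rw [PySem.Set.contains_iff, PySem.Set.mem_add, ← PySem.Set.contains_iff, hseen x]
        simp only [List.mem_append, List.mem_singleton]
  | @drop s xs lo hsC _ ih =>
    intro chosen seen maxs hC hseen hlt
    have hs : s ∈ chosen := hC s hsC
    simp only [csA_loop2, hs, if_true]
    rw [if_neg (by omega : ¬ (chosen.length : Int) = maxs)]
    exact ih chosen seen maxs hC hseen hlt

-- ===== VERDICT (by name: the statement is the Claim_ definition above) =====
theorem choose_unique_solutions_spec : Claim_equal_choose_unique_solutions := by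
  intro solutions maxs _
  unfold Spec_choose_unique_solutions
  show (let chosen := csA_loop1 solutions [] PySem.Set.empty maxs;
        if (chosen.length : Int) < maxs then csA_loop2 solutions chosen maxs else chosen) =
       (let r := csB_loop solutions [] [] PySem.Set.empty maxs;
        if (r.1.length : Int) < maxs then csB_fill r.2 r.1 (PySem.Set.ofList r.1) maxs else r.1)
  simp only []
  obtain ⟨h1, h2⟩ := csB_loop_spec solutions [] PySem.Set.empty [] maxs (Or.inr ⟨rfl, rfl⟩)
  rw [h1]
  by_cases hlt : ((csA_loop1 solutions [] PySem.Set.empty maxs).length : Int) < maxs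
  · simp only [hlt, if_true]
    obtain ⟨lo', hlo, hm⟩ := h2 (by omega)
    rw [hlo]
    simp only [List.nil_append]
    exact fill_eq _ solutions lo' hm _ (PySem.Set.ofList _) maxs (fun _ h => h)
      (fun s => by rw [PySem.Set.contains_iff, PySem.Set.mem_ofList]) hlt
  · simp only [hlt, if_false]
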